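-- pv_equiv track=rewrite | github.com/glenjasper/AmpliconFlow | scripts/rename_database.py | build_taxonomy
-- ===== SOURCE A (Python) =====
-- def split_lineage(path: str):
--     taxa = [x for x in path.split(';') if x]
--
--     if not taxa:
--         return None, None
--
--     current = taxa[-1]
--
--     if len(taxa) == 1:
--         return None, current
--
--     parent = ';'.join(taxa[:-1]) + ';'
--
--     return parent, current
--
-- def build_taxonomy(taxpath, organism, dict_taxslv):
--     taxonomy = {}
--     taxonomy['species'] = organism
--
--     current_path = taxpath
--     while current_path:
--         info = dict_taxslv.get(current_path)
--
--         if not info: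
--             break
--
--         rank = info['rank']
--         parent, taxon = split_lineage(current_path)
--         taxonomy[rank] = taxon
--         current_path = parent
--
--     return taxonomy
-- ===== SOURCE B (Python) =====
-- def build_taxonomy(taxpath, organism, dict_taxslv):
--     taxa = [x for x in taxpath.split(';') if x]
--     pairs = []
--     if taxa:
--         pairs.append((taxpath, taxa[-1]))
--         for i in range(len(taxa) - 1, 0, -1):
--             pairs.append((';'.join(taxa[:i]) + ';', taxa[i - 1]))
--     taxonomy = {'species': organism}
--     for key, taxon in pairs:
--         info = dict_taxslv.get(key)
--         if not info:
--             break
--         taxonomy[info['rank']] = taxon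
--     return taxonomy
-- ===== Notes on version B (the rewrite author's own statement) =====
-- stated objective: alternative
-- what changed: Replaces the parent-pointer walk that re-splits and re-joins the remaining lineage on every iteration with one upfront split of taxpath and a precomputed forward list of (key, taxon) pairs that a single break-on-miss loop consumes.
-- outside the precondition, e.g. on build_taxonomy('a;b;', 'o', {'a;': {'x': 'y'}}): A returns {'species': 'o'}, B returns {'species': 'o'}; on build_taxonomy(';', '', {';': {'rank': 'g'}}): A returns {'species': '', 'g': None}, B returns {'species': ''}
import Mathlib
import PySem

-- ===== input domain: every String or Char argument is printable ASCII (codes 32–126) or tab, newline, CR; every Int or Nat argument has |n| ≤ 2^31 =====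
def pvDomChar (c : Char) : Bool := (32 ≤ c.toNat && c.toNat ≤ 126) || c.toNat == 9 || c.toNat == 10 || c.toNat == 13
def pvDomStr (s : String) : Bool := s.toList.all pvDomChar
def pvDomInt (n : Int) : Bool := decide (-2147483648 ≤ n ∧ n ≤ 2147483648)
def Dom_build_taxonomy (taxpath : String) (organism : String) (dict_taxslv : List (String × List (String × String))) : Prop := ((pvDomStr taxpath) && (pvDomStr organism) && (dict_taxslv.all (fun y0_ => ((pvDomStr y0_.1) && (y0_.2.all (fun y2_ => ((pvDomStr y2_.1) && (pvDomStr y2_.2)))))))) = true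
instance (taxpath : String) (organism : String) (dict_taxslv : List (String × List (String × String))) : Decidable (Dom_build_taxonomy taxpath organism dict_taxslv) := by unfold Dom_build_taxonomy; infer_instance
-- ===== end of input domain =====

-- B replaces A's parent-pointer walk (re-split + re-join of the remaining lineage each iteration)
-- with one upfront split and a precomputed forward list of (key, taxon) pairs; return values agree on Pre_.

-- ===== PORT A =====
-- `[x for x in path.split(';') if x]` (shared by both ports: the same Python expression occurs in both)
def pvTaxa (path : String) : List (List Char) :=
  (PySem.Chars.splitOn path.toList [';']).filter (fun x => !x.isEmpty)

-- split_lineage; `';'.join(xs) + ';'` is rendered exactly as `join ';' (xs ++ [''])`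
def split_lineage (path : String) : Option String × Option String :=
  match (pvTaxa path).getLast? with                    -- `if not taxa: return None, None` / `current = taxa[-1]`
  | none => (none, none)
  | some current =>
    if (pvTaxa path).length = 1 then (none, some (String.ofList current))
    else (some (String.ofList (PySem.Chars.join [';'] ((pvTaxa path).dropLast ++ [[]]))),
          some (String.ofList current))

-- the `while current_path:` loop; fuel is only a totality guard (the chain is proved shorter than the fuel)
def build_loop (dict_taxslv : List (String × List (String × String))) :
    Nat → PySem.Dict String String → Option String → PySem.Dict String String
  | 0, taxonomy, _ => taxonomy
  | fuel + 1, taxonomy, current_path =>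
    match current_path with
    | none => taxonomy                                  -- `while current_path` false (None)
    | some p =>
      if p = "" then taxonomy                           -- `while current_path` false (empty string)
      else
        match (PySem.Dict.mk dict_taxslv).get? p with
        | none => taxonomy                              -- `if not info: break` (missing)
        | some info =>
          if info.isEmpty then taxonomy                 -- `if not info: break` (empty dict)
          else
            match (PySem.Dict.mk info).get? "rank" with
            | none => taxonomy                          -- Python raises KeyError here; outside Pre_
            | some rank =>
              match split_lineage p with
              | (_, none) => taxonomy                   -- Python stores None (not a str) here; outside Pre_
              | (parent, some taxon) =>
                build_loop dict_taxslv fuel (taxonomy.insert rank taxon) parent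

def build_taxonomy (taxpath : String) (organism : String) (dict_taxslv : List (String × List (String × String))) : List (String × String) :=
  (build_loop dict_taxslv (taxpath.toList.length + 2)
    ((PySem.Dict.empty : PySem.Dict String String).insert "species" organism) (some taxpath)).items

-- ===== PORT B =====
-- the precomputed pair list: first `(taxpath, taxa[-1])`, then `(';'.join(taxa[:i]) + ';', taxa[i-1])`
-- for i in range(len(taxa)-1, 0, -1); `+ ';'` again rendered as `join ';' (· ++ [''])`
def pvPairs (taxpath : String) : List (String × String) :=
  match (pvTaxa taxpath).getLast? with
  | none => []
  | some lastTaxon =>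
    (taxpath, String.ofList lastTaxon) ::
      (PySem.List.pyRange (((pvTaxa taxpath).length : Int) - 1) 0 (-1)).map (fun i =>
        (String.ofList (PySem.Chars.join [';'] (PySem.List.slice (pvTaxa taxpath) none (some i) ++ [[]])),
         String.ofList ((PySem.List.pyGet? (pvTaxa taxpath) (i - 1)).getD [])))

-- `for key, taxon in pairs: ... break ...`
def alt_loop (dict_taxslv : List (String × List (String × String))) :
    PySem.Dict String String → List (String × String) → PySem.Dict String String
  | taxonomy, [] => taxonomy
  | taxonomy, (key, taxon) :: rest =>
    match (PySem.Dict.mk dict_taxslv).get? key with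
    | none => taxonomy
    | some info =>
      if info.isEmpty then taxonomy
      else
        match (PySem.Dict.mk info).get? "rank" with
        | none => taxonomy                              -- Python KeyError; outside Pre_
        | some rank => alt_loop dict_taxslv (taxonomy.insert rank taxon) rest

def build_taxonomy_alt (taxpath : String) (organism : String) (dict_taxslv : List (String × List (String × String))) : List (String × String) :=
  (alt_loop dict_taxslv
    ((PySem.Dict.empty : PySem.Dict String String).insert "species" organism) (pvPairs taxpath)).items

-- ===== PRECONDITION & SPEC =====
-- the lineage prefix keys A can ever look up: taxpath itself, then ';'.join(taxa[:j]) + ';' for 1 ≤ j < len(taxa)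
def preKeys (taxpath : String) : List String :=
  taxpath :: (List.range ((pvTaxa taxpath).length - 1)).map (fun i =>
    String.ofList (PySem.Chars.join [';'] ((pvTaxa taxpath).take (i + 1) ++ [[]])))

-- Pre_ excludes inputs where a key on taxpath's lineage prefix chain maps to a non-empty record
-- without a 'rank' key (A raises KeyError when it reaches such a record; chain records after an
-- earlier break are excluded too, for a closed form), and excludes a non-empty taxpath with no
-- non-empty ';'-components whose own record is truthy (there A stores None, which is not a str value).
def Pre_build_taxonomy (taxpath : String) (organism : String) (dict_taxslv : List (String × List (String × String))) : Prop :=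
  (∀ key ∈ preKeys taxpath,
     ((PySem.Dict.mk dict_taxslv).get? key).getD [] ≠ [] →
       ((PySem.Dict.mk (((PySem.Dict.mk dict_taxslv).get? key).getD [])).get? "rank").isSome) ∧
  (pvTaxa taxpath = [] → taxpath = "" ∨ ((PySem.Dict.mk dict_taxslv).get? taxpath).getD [] = [])
instance (taxpath : String) (organism : String) (dict_taxslv : List (String × List (String × String))) : Decidable (Pre_build_taxonomy taxpath organism dict_taxslv) := by unfold Pre_build_taxonomy; infer_instance

def pvWitness_build_taxonomy : String × String × (List (String × List (String × String))) :=
  ("A;B;", "org", [("A;B;", [("rank", "genus")]), ("A;", [("rank", "kingdom")])])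

def Spec_build_taxonomy (taxpath : String) (organism : String) (dict_taxslv : List (String × List (String × String))) (out : List (String × String)) : Prop := out = build_taxonomy_alt taxpath organism dict_taxslv
instance (taxpath : String) (organism : String) (dict_taxslv : List (String × List (String × String))) (out : List (String × String)) : Decidable (Spec_build_taxonomy taxpath organism dict_taxslv out) := by unfold Spec_build_taxonomy; infer_instance

-- ===== CLAIM (what is proved, stated in full; the proofs are below) =====
def Claim_equal_build_taxonomy : Prop := ∀ (taxpath : String) (organism : String) (dict_taxslv : List (String × List (String × String))), Dom_build_taxonomy taxpath organism dict_taxslv → Pre_build_taxonomy taxpath organism dict_taxslv → Spec_build_taxonomy taxpath organism dict_taxslv (build_taxonomy taxpath organism dict_taxslv)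

-- ===== LEMMAS AND PROOFS =====

-- a direct structural recursion computing `cs.split(c)` (single-character separator)
def pvSplit (c : Char) : List Char → List (List Char)
  | [] => [[]]
  | x :: rest => if x = c then [] :: pvSplit c rest else (pvSplit c rest).modifyHead (x :: ·)

lemma modifyHead_fun_id {α : Type} (l : List α) : l.modifyHead (fun x => x) = l := by
  cases l <;> simp

lemma pvSplit_ne_nil (c : Char) (l : List Char) : pvSplit c l ≠ [] := by
  induction l with
  | nil => simp [pvSplit]
  | cons x rest ih =>
    simp only [pvSplit]
    split
    · simp
    · cases h : pvSplit c rest with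
      | nil => exact absurd h ih
      | cons a t => simp

lemma go_eq_pvSplit (c : Char) :
    ∀ (fuel : Nat) (l cur : List Char) (acc : List (List Char)), l.length ≤ fuel →
      PySem.Chars.splitOn.go [c] fuel l cur acc =
        acc.reverse ++ (pvSplit c l).modifyHead (cur.reverse ++ ·) := by
  intro fuel
  induction fuel with
  | zero =>
    intro l cur acc hl
    have : l = [] := by cases l <;> simp_all
    subst this
    simp [PySem.Chars.splitOn.go, pvSplit]
  | succ fuel ih =>
    intro l cur acc hl
    cases l with
    | nil => simp [PySem.Chars.splitOn.go, pvSplit]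
    | cons x rest =>
      by_cases hx : x = c
      · subst hx
        have hpre : [x].isPrefixOf (x :: rest) = true := by simp [List.isPrefixOf]
        rw [PySem.Chars.splitOn.go]
        simp only [hpre, if_true, List.length_singleton, List.drop_succ_cons, List.drop_zero]
        simp only [List.length_cons] at hl
        rw [ih rest [] (cur.reverse :: acc) (by omega)]
        simp [pvSplit, modifyHead_fun_id]
      · have hpre : [c].isPrefixOf (x :: rest) = false := by
          simp [List.isPrefixOf]
          exact fun h => absurd h.symm hx
        rw [PySem.Chars.splitOn.go]
        simp only [hpre, Bool.false_eq_true, if_false]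
        rw [ih rest (x :: cur) acc (by simpa using Nat.le_of_succ_le_succ hl)]
        simp only [pvSplit, if_neg hx, List.modifyHead_modifyHead]
        congr 1
        cases h : pvSplit c rest with
        | nil => exact absurd h (pvSplit_ne_nil c rest)
        | cons a t => simp

lemma splitOn_eq_pvSplit (c : Char) (cs : List Char) :
    PySem.Chars.splitOn cs [c] = pvSplit c cs := by
  have := go_eq_pvSplit c (cs.length + 1) cs [] [] (by omega)
  simpa [PySem.Chars.splitOn, modifyHead_fun_id] using this

lemma not_mem_of_mem_pvSplit (c : Char) (cs : List Char) :
    ∀ l ∈ pvSplit c cs, c ∉ l := by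
  induction cs with
  | nil => simp [pvSplit]
  | cons x rest ih =>
    simp only [pvSplit]
    split
    · intro l hl
      rcases List.mem_cons.mp hl with h | h
      · simp [h]
      · exact ih l h
    · rename_i hx
      cases hs : pvSplit c rest with
      | nil => exact absurd hs (pvSplit_ne_nil c rest)
      | cons a t =>
        intro l hl
        simp only [List.modifyHead] at hl
        rcases List.mem_cons.mp hl with h' | h'
        · subst h'
          intro hmem
          rcases List.mem_cons.mp hmem with h'' | h''
          · exact hx h''.symm
          · exact ih a (hs ▸ List.mem_cons_self) h''
        · exact ih l (hs ▸ List.mem_cons_of_mem a h')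

lemma pvSplit_append_cons (c : Char) (y rest : List Char) (hy : c ∉ y) :
    pvSplit c (y ++ c :: rest) = y :: pvSplit c rest := by
  induction y with
  | nil => simp [pvSplit]
  | cons x y' ih =>
    have hx : x ≠ c := fun h => hy (h ▸ List.mem_cons_self)
    have hy' : c ∉ y' := fun h => hy (List.mem_cons_of_mem x h)
    simp only [List.cons_append, pvSplit, if_neg hx, ih hy']
    simp

lemma pvSplit_intercalate (c : Char) :
    ∀ ys : List (List Char), (∀ y ∈ ys, c ∉ y) →
      pvSplit c ([c].intercalate (ys ++ [[]])) = ys ++ [[]] := by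
  intro ys
  induction ys with
  | nil => simp [List.intercalate, pvSplit]
  | cons y ys ih =>
    intro h
    have h1 : [c].intercalate ((y :: ys) ++ [[]]) = y ++ c :: [c].intercalate (ys ++ [[]]) := by
      cases ys <;> simp [List.intercalate, List.intersperse]
    rw [h1, pvSplit_append_cons c _ _ (h y List.mem_cons_self),
        ih (fun z hz => h z (List.mem_cons_of_mem y hz))]
    simp

lemma filter_append_nil (ys : List (List Char)) (h : ∀ y ∈ ys, y ≠ []) :
    (ys ++ [([] : List Char)]).filter (fun x => !x.isEmpty) = ys := by
  rw [List.filter_append]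
  have h2 : List.filter (fun x => !x.isEmpty) ys = ys := by
    rw [List.filter_eq_self]
    intro a ha
    simpa [List.isEmpty_iff] using h a ha
  rw [h2]
  simp

-- members of pvTaxa are non-empty and ';'-free
lemma pvTaxa_mem (s : String) : ∀ x ∈ pvTaxa s, x ≠ [] ∧ ';' ∉ x := by
  intro x hx
  unfold pvTaxa at hx
  rw [splitOn_eq_pvSplit] at hx
  have h1 := List.of_mem_filter hx
  have h2 := List.mem_of_mem_filter hx
  exact ⟨by simpa using h1, not_mem_of_mem_pvSplit ';' s.toList x h2⟩

-- re-splitting the re-joined parent gives back exactly the remaining taxa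
lemma pvTaxa_rejoin (ys : List (List Char)) (h : ∀ y ∈ ys, y ≠ [] ∧ ';' ∉ y) :
    pvTaxa (String.ofList (PySem.Chars.join [';'] (ys ++ [[]]))) = ys := by
  unfold pvTaxa
  rw [String.toList_ofList, PySem.Chars.join, splitOn_eq_pvSplit,
      pvSplit_intercalate ';' ys (fun y hy => (h y hy).2),
      filter_append_nil ys (fun y hy => (h y hy).1)]

lemma pvTaxa_empty : pvTaxa "" = [] := by decide

lemma pvSplit_length (c : Char) (l : List Char) : (pvSplit c l).length ≤ l.length + 1 := by
  induction l with
  | nil => simp [pvSplit]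
  | cons x rest ih =>
    simp only [pvSplit]
    split
    · simp only [List.length_cons]
      omega
    · rw [List.length_modifyHead]
      simp only [List.length_cons]
      omega

lemma pvTaxa_length_le (s : String) : (pvTaxa s).length ≤ s.toList.length + 1 := by
  unfold pvTaxa
  rw [splitOn_eq_pvSplit]
  exact le_trans (List.length_filter_le _ _) (pvSplit_length ';' s.toList)

-- the ideal recursive form of B's pair list
def chainPairs : List (List Char) → List (String × String)
  | [] => []
  | y :: ys =>
    (String.ofList (PySem.Chars.join [';'] ((y :: ys) ++ [[]])),
     String.ofList ((y :: ys).getLast (by simp))) :: chainPairs (y :: ys).dropLast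
  termination_by l => l.length
  decreasing_by simp

def pairsK (k : String) (taxa : List (List Char)) : List (String × String) :=
  match taxa.getLast? with
  | none => []
  | some t => (k, String.ofList t) :: chainPairs taxa.dropLast

lemma chainPairs_eq_pairsK (ys : List (List Char)) (h : ys ≠ []) :
    chainPairs ys = pairsK (String.ofList (PySem.Chars.join [';'] (ys ++ [[]]))) ys := by
  cases ys with
  | nil => exact absurd rfl h
  | cons y t =>
    rw [chainPairs, pairsK]
    simp [List.getLast?_eq_some_getLast]

lemma pyRange_neg_one (n : Nat) :
    PySem.List.pyRange (n : Int) 0 (-1) = (List.range n).map (fun (k : Nat) => (n : Int) - (k : Int)) := by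
  cases n with
  | zero => simp [PySem.List.pyRange]
  | succ m =>
    simp only [PySem.List.pyRange]
    norm_num
    intro a _
    omega

lemma pyRange_neg_one_succ (n : Nat) :
    PySem.List.pyRange ((n + 1 : Nat) : Int) 0 (-1) = ((n + 1 : Nat) : Int) :: PySem.List.pyRange ((n : Nat) : Int) 0 (-1) := by
  rw [pyRange_neg_one, pyRange_neg_one, List.range_succ_eq_map, List.map_cons, List.map_map]
  congr 1
  simp

lemma chainPairs_cons_eq (ys : List (List Char)) (h : ys ≠ []) :
    chainPairs ys =
      (String.ofList (PySem.Chars.join [';'] (ys ++ [[]])), String.ofList (ys.getLast h)) ::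
        chainPairs ys.dropLast := by
  cases ys with
  | nil => exact absurd rfl h
  | cons y t => rw [chainPairs]

lemma pairsK_cons (k : String) (y : List Char) (ts : List (List Char)) :
    pairsK k (y :: ts) =
      (k, String.ofList ((y :: ts).getLast (by simp))) :: chainPairs (y :: ts).dropLast := by
  rw [pairsK]
  simp [List.getLast?_eq_some_getLast]

lemma map_range_eq_chainPairs (taxa : List (List Char)) :
    ∀ n : Nat, n ≤ taxa.length →
      (PySem.List.pyRange ((n : Nat) : Int) 0 (-1)).map (fun i =>
        (String.ofList (PySem.Chars.join [';'] (PySem.List.slice taxa none (some i) ++ [[]])),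
         String.ofList ((PySem.List.pyGet? taxa (i - 1)).getD []))) = chainPairs (taxa.take n) := by
  intro n
  induction n with
  | zero =>
    intro _
    simp [PySem.List.pyRange, chainPairs]
  | succ m ih =>
    intro h
    have hm : m < taxa.length := by omega
    rw [pyRange_neg_one_succ, List.map_cons, ih (by omega)]
    have hne : taxa.take (m + 1) ≠ [] := by
      intro hnil
      have hlen := congrArg List.length hnil
      simp only [List.length_take, List.length_nil] at hlen
      omega
    rw [chainPairs_cons_eq _ hne]
    congr 1
    · -- the head pair
      congr 1
      · -- the key
        rw [PySem.List.slice_to taxa (by positivity), Int.toNat_natCast]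
      · -- the taxon
        rw [show ((m + 1 : Nat) : Int) - 1 = ((m : Nat) : Int) from by push_cast; ring,
            PySem.List.pyGet?_natCast, List.getElem?_eq_getElem hm]
        congr 1
        rw [List.getLast_eq_getElem]
        simp only [List.length_take]
        have : min (m + 1) taxa.length = m + 1 := by omega
        simp only [this]
        rw [List.getElem_take]
        simp
    · -- the tail
      rw [List.dropLast_eq_take, List.length_take, List.take_take]
      have hmin : min (min (m + 1) taxa.length - 1) (m + 1) = m := by omega
      rw [hmin]

lemma pvPairs_eq_pairsK (tp : String) : pvPairs tp = pairsK tp (pvTaxa tp) := by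
  unfold pvPairs pairsK
  cases h : (pvTaxa tp).getLast? with
  | none => rfl
  | some t =>
    have hne : pvTaxa tp ≠ [] := by
      intro hnil; rw [hnil] at h; simp at h
    have hlen : 1 ≤ (pvTaxa tp).length := by
      cases hc : pvTaxa tp with
      | nil => exact absurd hc hne
      | cons a b => simp
    rw [show ((pvTaxa tp).length : Int) - 1 = (((pvTaxa tp).length - 1 : Nat) : Int) from by rw [Nat.cast_sub hlen]; norm_num,
        map_range_eq_chainPairs (pvTaxa tp) ((pvTaxa tp).length - 1) (by omega),
        ← List.dropLast_eq_take]

lemma loop_none (d : List (String × List (String × String))) (fuel : Nat) (tax : PySem.Dict String String)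
    (h : 1 ≤ fuel) : build_loop d fuel tax none = tax := by
  cases fuel with
  | zero => omega
  | succ f => rfl

lemma loop_empty (d : List (String × List (String × String))) (k : String) (tax : PySem.Dict String String)
    (fuel : Nat) (hf : 1 ≤ fuel)
    (h2 : k = "" ∨ ((PySem.Dict.mk d).get? k).getD [] = []) :
    build_loop d fuel tax (some k) = tax := by
  cases fuel with
  | zero => omega
  | succ f =>
    simp only [build_loop]
    by_cases hke : k = ""
    · rw [if_pos hke]
    · rw [if_neg hke]
      rcases h2 with h2 | h2
      · exact absurd h2 hke
      · cases hg : (PySem.Dict.mk d).get? k with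
        | none => rfl
        | some info =>
          rw [hg] at h2
          simp only [Option.getD_some] at h2
          subst h2
          simp

lemma pvTaxa_ne_nil_imp (k : String) (h : pvTaxa k ≠ []) : k ≠ "" := by
  intro hk
  subst hk
  exact h pvTaxa_empty

lemma split_lineage_eq (k : String) (y : List Char) (t : List (List Char)) (htaxa : pvTaxa k = y :: t) :
    split_lineage k =
      ((if t = [] then none
        else some (String.ofList (PySem.Chars.join [';'] ((y :: t).dropLast ++ [[]])))),
       some (String.ofList ((y :: t).getLast (by simp)))) := by
  unfold split_lineage
  rw [htaxa, List.getLast?_eq_some_getLast (by simp)]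
  simp only [List.length_cons]
  by_cases ht : t = []
  · subst ht
    simp
  · have : ¬ (t.length + 1 = 1) := by
      cases t with
      | nil => exact absurd rfl ht
      | cons a b => simp
    rw [if_neg this, if_neg ht]

-- one-step / break lemmas for the two loops
lemma build_step_none (d : List (String × List (String × String))) (f : Nat) (tax : PySem.Dict String String)
    (k : String) (hk : k ≠ "") (hg : (PySem.Dict.mk d).get? k = none) :
    build_loop d (f + 1) tax (some k) = tax := by
  simp [build_loop, hk, hg]

lemma build_step_empty (d : List (String × List (String × String))) (f : Nat) (tax : PySem.Dict String String)
    (k : String) (hk : k ≠ "") (hg : (PySem.Dict.mk d).get? k = some []) :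
    build_loop d (f + 1) tax (some k) = tax := by
  simp [build_loop, hk, hg]

lemma build_step (d : List (String × List (String × String))) (f : Nat) (tax : PySem.Dict String String)
    (k : String) (info : List (String × String)) (r : String) (parent : Option String) (taxon : String)
    (hk : k ≠ "") (hg : (PySem.Dict.mk d).get? k = some info) (hine : info ≠ [])
    (hr : (PySem.Dict.mk info).get? "rank" = some r)
    (hsl : split_lineage k = (parent, some taxon)) :
    build_loop d (f + 1) tax (some k) = build_loop d f (tax.insert r taxon) parent := by
  simp [build_loop, hk, hg, hine, hr, hsl]

lemma alt_step_none (d : List (String × List (String × String))) (tax : PySem.Dict String String)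
    (key taxon : String) (rest : List (String × String)) (hg : (PySem.Dict.mk d).get? key = none) :
    alt_loop d tax ((key, taxon) :: rest) = tax := by
  simp [alt_loop, hg]

lemma alt_step_empty (d : List (String × List (String × String))) (tax : PySem.Dict String String)
    (key taxon : String) (rest : List (String × String)) (hg : (PySem.Dict.mk d).get? key = some []) :
    alt_loop d tax ((key, taxon) :: rest) = tax := by
  simp [alt_loop, hg]

lemma alt_step (d : List (String × List (String × String))) (tax : PySem.Dict String String)
    (key taxon : String) (rest : List (String × String)) (info : List (String × String)) (r : String)
    (hg : (PySem.Dict.mk d).get? key = some info) (hine : info ≠ [])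
    (hr : (PySem.Dict.mk info).get? "rank" = some r) :
    alt_loop d tax ((key, taxon) :: rest) = alt_loop d (tax.insert r taxon) rest := by
  simp [alt_loop, hg, hine, hr]

-- main loop correspondence
lemma main_loop (d : List (String × List (String × String))) :
    ∀ (N : Nat) (taxa : List (List Char)) (k : String) (tax : PySem.Dict String String) (fuel : Nat),
      taxa.length ≤ N → pvTaxa k = taxa → taxa.length + 1 ≤ fuel →
      (pvTaxa k = [] → k = "" ∨ ((PySem.Dict.mk d).get? k).getD [] = []) →
      (((PySem.Dict.mk d).get? k).getD [] ≠ [] →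
        ((PySem.Dict.mk (((PySem.Dict.mk d).get? k).getD [])).get? "rank").isSome) →
      (∀ j, 1 ≤ j → j + 1 ≤ taxa.length →
        ((PySem.Dict.mk d).get? (String.ofList (PySem.Chars.join [';'] (taxa.take j ++ [[]])))).getD [] ≠ [] →
          ((PySem.Dict.mk (((PySem.Dict.mk d).get? (String.ofList (PySem.Chars.join [';'] (taxa.take j ++ [[]])))).getD [])).get? "rank").isSome) →
      build_loop d fuel tax (some k) = alt_loop d tax (pairsK k taxa) := by
  intro N
  induction N with
  | zero =>
    intro taxa k tax fuel hN htaxa hfuel h2 hk hks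
    have htn : taxa = [] := List.eq_nil_of_length_eq_zero (Nat.le_zero.mp hN)
    subst htn
    rw [loop_empty d k tax fuel (by omega) (h2 htaxa)]
    rfl
  | succ M ih =>
    intro taxa k tax fuel hN htaxa hfuel h2 hk hks
    cases taxa with
    | nil =>
      rw [loop_empty d k tax fuel (by omega) (h2 htaxa)]
      rfl
    | cons y t =>
      have hkne : k ≠ "" := pvTaxa_ne_nil_imp k (by rw [htaxa]; simp)
      cases fuel with
      | zero => omega
      | succ f =>
        rw [pairsK_cons]
        cases hg : (PySem.Dict.mk d).get? k with
        | none => rw [build_step_none d f tax k hkne hg, alt_step_none d tax _ _ _ hg]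
        | some info =>
          by_cases hine : info = []
          · subst hine
            rw [build_step_empty d f tax k hkne hg, alt_step_empty d tax _ _ _ hg]
          · have hrs := hk (by rw [hg]; simpa using hine)
            rw [hg] at hrs
            simp only [Option.getD_some] at hrs
            obtain ⟨r, hr⟩ := Option.isSome_iff_exists.mp hrs
            have hmem : ∀ x ∈ y :: t, x ≠ [] ∧ ';' ∉ x := by
              intro x hx
              exact pvTaxa_mem k x (htaxa ▸ hx)
            rw [alt_step d tax _ _ _ info r hg hine hr]
            by_cases ht : t = []
            · subst ht
              rw [build_step d f tax k info r none (String.ofList ([y].getLast (by simp))) hkne hg hine hr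
                    (by rw [split_lineage_eq k y [] htaxa]; simp),
                  loop_none d f _ (by simp only [List.length_cons, List.length_nil] at hfuel; omega)]
              have hcp : chainPairs (([y] : List (List Char)).dropLast) = [] := by
                rw [show (([y] : List (List Char)).dropLast) = [] from rfl, chainPairs]
              rw [hcp]
              rfl
            · have hdlne : (y :: t).dropLast ≠ [] := by
                cases t with
                | nil => exact absurd rfl ht
                | cons a b => simp
              have hdl_mem : ∀ x ∈ (y :: t).dropLast, x ≠ [] ∧ ';' ∉ x := by
                intro x hx
                exact hmem x (List.dropLast_subset _ hx)
              have hrejoin := pvTaxa_rejoin ((y :: t).dropLast) hdl_mem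
              have htlen : 1 ≤ t.length := by
                cases t with
                | nil => exact absurd rfl ht
                | cons a b => simp
              have hkey : ((y :: t).dropLast : List (List Char)) = (y :: t).take t.length := by
                rw [List.dropLast_eq_take]
                simp
              have hk' : ((PySem.Dict.mk d).get? (String.ofList (PySem.Chars.join [';'] ((y :: t).dropLast ++ [[]])))).getD [] ≠ [] →
                  ((PySem.Dict.mk (((PySem.Dict.mk d).get? (String.ofList (PySem.Chars.join [';'] ((y :: t).dropLast ++ [[]])))).getD [])).get? "rank").isSome := by
                rw [hkey]
                exact hks t.length htlen (by simp)
              have hks' : ∀ j, 1 ≤ j → j + 1 ≤ ((y :: t).dropLast : List (List Char)).length →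
                  ((PySem.Dict.mk d).get? (String.ofList (PySem.Chars.join [';'] (((y :: t).dropLast : List (List Char)).take j ++ [[]])))).getD [] ≠ [] →
                    ((PySem.Dict.mk (((PySem.Dict.mk d).get? (String.ofList (PySem.Chars.join [';'] (((y :: t).dropLast : List (List Char)).take j ++ [[]])))).getD [])).get? "rank").isSome := by
                intro j hj1 hj2
                have hj2' : j + 1 ≤ t.length := by
                  simp only [List.length_dropLast, List.length_cons] at hj2
                  omega
                have e : (((y :: t).dropLast : List (List Char)).take j) = (y :: t).take j := by
                  rw [List.dropLast_eq_take, List.take_take]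
                  congr 1
                  simp only [List.length_cons]
                  omega
                rw [e]
                exact hks j hj1 (by simp only [List.length_cons]; omega)
              rw [build_step d f tax k info r
                    (some (String.ofList (PySem.Chars.join [';'] ((y :: t).dropLast ++ [[]]))))
                    (String.ofList ((y :: t).getLast (by simp))) hkne hg hine hr
                    (by rw [split_lineage_eq k y t htaxa, if_neg ht]),
                  ih ((y :: t).dropLast)
                    (String.ofList (PySem.Chars.join [';'] ((y :: t).dropLast ++ [[]])))
                    (tax.insert r (String.ofList ((y :: t).getLast (by simp)))) f
                    (by simp only [List.length_dropLast, List.length_cons] at *; omega)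
                    hrejoin
                    (by simp only [List.length_dropLast, List.length_cons] at *; omega)
                    (fun hc => False.elim (hdlne (by rw [hrejoin] at hc; exact hc)))
                    hk' hks',
                  chainPairs_eq_pairsK ((y :: t).dropLast) hdlne]

-- ===== VERDICT (by name: the statement is the Claim_ definition above) =====
theorem build_taxonomy_spec : Claim_equal_build_taxonomy := by
  intro taxpath organism dict_taxslv _hdom hpre
  unfold Spec_build_taxonomy build_taxonomy build_taxonomy_alt
  rw [pvPairs_eq_pairsK]
  congr 1
  exact main_loop dict_taxslv (pvTaxa taxpath).length (pvTaxa taxpath) taxpath _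
    (taxpath.toList.length + 2) le_rfl rfl (by have := pvTaxa_length_le taxpath; omega) hpre.2
    (hpre.1 taxpath (List.mem_cons_self))
    (fun j hj1 hj2 => hpre.1 _ (List.mem_cons_of_mem _ (List.mem_map.mpr
      ⟨j - 1, List.mem_range.mpr (by omega), by rw [Nat.sub_add_cancel hj1]⟩)))
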